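-- pv_equiv track=rewrite | github.com/MarcoLeMoglie/Sound_of_Culture | data/phase_01_dataset_construction/processed/country_artists/replication_package_country_songs_2026_04_01/scripts/02_build_artist_bio_lookup.py | pipe_join
-- ===== SOURCE A (Python) =====
-- from typing import Dict, Iterable, List, Optional, Sequence
--
-- def pipe_join(values: Iterable[str]) -> str:
--     seen = set()
--     output = []
--     for value in values:
--         if value is None:
--             continue
--         text = str(value).strip()
--         if not text or text.lower() == "nan":
--             continue
--         if text not in seen:
--             seen.add(text)
--             output.append(text)
--     return "|".join(output)
-- ===== SOURCE B (Python) =====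
-- def pipe_join(values):
--     cleaned = [str(v).strip() for v in values if v is not None]
--     rest = [t for t in cleaned if t and t.lower() != "nan"]
--     parts = []
--     while rest:
--         head = rest[0]
--         parts.append(head)
--         rest = [t for t in rest[1:] if t != head]
--     return "|".join(parts)
-- ===== Notes on version B (the rewrite author's own statement) =====
-- stated objective: alternative
-- what changed: Deduplication by repeated head-extraction: take the first remaining element and filter all its later duplicates out of the rest, looping until empty; no seen-set or membership test is maintained.
import Mathlib
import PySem

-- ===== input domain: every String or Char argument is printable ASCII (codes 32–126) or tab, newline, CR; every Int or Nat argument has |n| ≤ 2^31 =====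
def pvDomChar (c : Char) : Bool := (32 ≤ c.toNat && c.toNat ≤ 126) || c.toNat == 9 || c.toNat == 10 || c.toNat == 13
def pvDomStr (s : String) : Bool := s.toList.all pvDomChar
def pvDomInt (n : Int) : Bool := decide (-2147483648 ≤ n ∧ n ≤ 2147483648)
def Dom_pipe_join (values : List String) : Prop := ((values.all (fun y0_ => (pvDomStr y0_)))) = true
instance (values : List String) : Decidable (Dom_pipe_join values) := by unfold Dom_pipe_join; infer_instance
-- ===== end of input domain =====

-- B deduplicates by repeated head-extraction (take first element, filter its duplicates out of the
-- rest, loop) instead of A's seen-set/output-list pass; alternative decomposition, return value only.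

-- ===== PORT A =====
-- A's loop body (seen, output) -> value -> (seen, output)
def pipeJoinStep (st : PySem.Set String × List String) (value : String) :
    PySem.Set String × List String :=
  let text := PySem.Str.strip value
  if text == "" || PySem.Str.lower text == "nan" then st
  else if PySem.Set.contains st.1 text then st
  else (PySem.Set.add st.1 text, st.2 ++ [text])

def pipe_join (values : List String) : String :=
  let st := values.foldl pipeJoinStep (PySem.Set.empty, [])
  PySem.Str.join "|" st.2

-- ===== PORT B =====
-- B's while loop: parts accumulator, rest shrinks to the filtered tail each iteration.
def pipeJoinLoop (parts : List String) (rest : List String) : List String :=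
  match rest with
  | [] => parts
  | head :: tl => pipeJoinLoop (parts ++ [head]) (tl.filter (fun t => !(t == head)))
termination_by rest.length
decreasing_by
  have h1 := List.length_filter_le (fun x : {x // x ∈ tl} => !((x : String) == head)) tl.attach
  simp [List.length_attach] at h1
  simp
  omega

def pipe_join_alt (values : List String) : String :=
  let cleaned := values.map PySem.Str.strip
  let rest := cleaned.filter (fun t => !(t == "") && !(PySem.Str.lower t == "nan"))
  PySem.Str.join "|" (pipeJoinLoop [] rest)

-- ===== PRECONDITION & SPEC =====
def Spec_pipe_join (values : List String) (out : String) : Prop := out = pipe_join_alt values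
instance (values : List String) (out : String) : Decidable (Spec_pipe_join values out) := by unfold Spec_pipe_join; infer_instance

-- ===== CLAIM (what is proved, stated in full; the proofs are below) =====
def Claim_equal_pipe_join : Prop := ∀ (values : List String), Dom_pipe_join values → Spec_pipe_join values (pipe_join values)

-- ===== LEMMAS AND PROOFS =====

-- A's loop, started on a state (s, s) (seen = output so far), computes PySem.Set.update of s
-- by the stripped-and-filtered list, in both components.
theorem pipe_join_loop_inv (values : List String) :
    ∀ (s : List String),
      values.foldl pipeJoinStep (s, s) =
      (PySem.Set.update s ((values.map PySem.Str.strip).filter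
          (fun t => !(t == "") && !(PySem.Str.lower t == "nan"))),
       PySem.Set.update s ((values.map PySem.Str.strip).filter
          (fun t => !(t == "") && !(PySem.Str.lower t == "nan")))) := by
  induction values with
  | nil => intro s; simp [PySem.Set.update]
  | cons v vs ih =>
    intro s
    rw [List.foldl_cons, List.map_cons, List.filter_cons]
    by_cases h : (PySem.Str.strip v == "" || PySem.Str.lower (PySem.Str.strip v) == "nan") = true
    · have h' : (!(PySem.Str.strip v == "") && !(PySem.Str.lower (PySem.Str.strip v) == "nan")) = false := by
        cases hb : (PySem.Str.strip v == "") <;> simp_all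
      have hstep : pipeJoinStep (s, s) v = (s, s) := by simp [pipeJoinStep, h]
      rw [hstep, h', if_neg (by simp)]
      exact ih s
    · have h' : (!(PySem.Str.strip v == "") && !(PySem.Str.lower (PySem.Str.strip v) == "nan")) = true := by
        cases hb : (PySem.Str.strip v == "") <;> simp_all
      rw [h', if_pos rfl]
      by_cases hm : PySem.Str.strip v ∈ s
      · have hstep : pipeJoinStep (s, s) v = (s, s) := by
          simp [pipeJoinStep, h, hm]
        rw [hstep, PySem.Set.update_cons, PySem.Set.add_of_mem hm]
        exact ih s
      · have hstep : pipeJoinStep (s, s) v =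
            (s ++ [PySem.Str.strip v], s ++ [PySem.Str.strip v]) := by
          simp [pipeJoinStep, h, hm, PySem.Set.add_of_not_mem hm]
        rw [hstep, PySem.Set.update_cons, PySem.Set.add_of_not_mem hm]
        exact ih (s ++ [PySem.Str.strip v])

-- Updating a set ignores a filter that only removes elements already in the set.
theorem update_filter_mem (l : List String) :
    ∀ (s : List String) (p : String → Bool), (∀ x ∈ l, p x = false → x ∈ s) →
      PySem.Set.update s (l.filter p) = PySem.Set.update s l := by
  induction l with
  | nil => intro s p _; rfl
  | cons a l ih =>
    intro s p hp
    rw [List.filter_cons]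
    by_cases ha : p a = true
    · rw [if_pos ha, PySem.Set.update_cons, PySem.Set.update_cons]
      refine ih _ p (fun x hx hf => ?_)
      have hxs := hp x (List.mem_cons_of_mem _ hx) hf
      simp [PySem.Set.mem_add]
      tauto
    · have ha' : p a = false := by simpa using ha
      rw [if_neg (by simp [ha']), PySem.Set.update_cons,
          PySem.Set.add_of_mem (hp a (List.mem_cons_self ..) ha')]
      exact ih s p (fun x hx => hp x (List.mem_cons_of_mem _ hx))

theorem pipeJoinLoop_nil (parts : List String) : pipeJoinLoop parts [] = parts := by
  unfold pipeJoinLoop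
  rfl

theorem pipeJoinLoop_cons (parts : List String) (head : String) (tl : List String) :
    pipeJoinLoop parts (head :: tl) =
      pipeJoinLoop (parts ++ [head]) (tl.filter (fun t => !(t == head))) := by
  rw [pipeJoinLoop.eq_def]

-- B's head-extraction loop computes PySem.Set.update of its accumulator, provided no remaining
-- element is already in the accumulator.
theorem pipeJoinLoop_eq_update :
    ∀ (n : Nat) (rest : List String), rest.length ≤ n →
      ∀ (parts : List String), (∀ x ∈ rest, x ∉ parts) →
        pipeJoinLoop parts rest = PySem.Set.update parts rest := by
  intro n
  induction n with
  | zero =>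
    intro rest hn parts _
    have : rest = [] := List.eq_nil_of_length_eq_zero (Nat.le_zero.mp hn)
    subst this; simp [pipeJoinLoop_nil, PySem.Set.update]
  | succ n ih =>
    intro rest hn parts hdisj
    match rest with
    | [] => simp [pipeJoinLoop_nil, PySem.Set.update]
    | head :: tl =>
      rw [pipeJoinLoop_cons, PySem.Set.update_cons,
          PySem.Set.add_of_not_mem (hdisj head (List.mem_cons_self ..))]
      have hlen : (tl.filter (fun t => !(t == head))).length ≤ n :=
        Nat.le_trans (List.length_filter_le _ _) (Nat.le_of_succ_le_succ hn)
      rw [ih _ hlen (parts ++ [head]) ?_, update_filter_mem tl (parts ++ [head]) _ ?_]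
      · intro x hx hfx
        simp at hfx
        simp [hfx]
      · intro x hx
        have hx' := List.of_mem_filter hx
        have hxtl := List.mem_of_mem_filter hx
        simp at hx' ⊢
        exact ⟨fun hm => hdisj x (List.mem_cons_of_mem _ hxtl) hm, hx'⟩

-- ===== VERDICT (by name: the statement is the Claim_ definition above) =====
theorem pipe_join_spec : Claim_equal_pipe_join := by
  intro values _
  unfold Spec_pipe_join pipe_join pipe_join_alt
  rw [show (PySem.Set.empty : PySem.Set String) = ([] : List String) from rfl,
      pipe_join_loop_inv values []]
  exact congrArg (PySem.Str.join "|")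
    (pipeJoinLoop_eq_update _ _ (Nat.le_refl _) [] (by simp)).symm
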